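-- pv_equiv track=rewrite | github.com/iitwebdev/lectures | WSGI/ianb/PageSplitter/pagesplitter/command.py | paged
-- ===== SOURCE A (Python) =====
-- def paged(seq, sentinal=None):
--     prev = sentinal
--     cur = sentinal
--     empty = True
--     for item in seq:
--         if empty:
--             # First run
--             empty = False
--         else:
--             yield prev, cur, item
--         prev = cur
--         cur = item
--     if not empty:
--         yield prev, cur, sentinal
-- ===== SOURCE B (Python) =====
-- def paged(seq, sentinal=None):
--     padded = [sentinal] + list(seq) + [sentinal]
--     yield from zip(padded, padded[1:], padded[2:])
-- ===== Notes on version B (the rewrite author's own statement) =====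
-- stated objective: idiomatic
-- what changed: Replaces the prev/cur/empty streaming state machine with a padded list ([sentinal]+seq+[sentinal]) zipped against its two offset views.
import Mathlib
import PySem

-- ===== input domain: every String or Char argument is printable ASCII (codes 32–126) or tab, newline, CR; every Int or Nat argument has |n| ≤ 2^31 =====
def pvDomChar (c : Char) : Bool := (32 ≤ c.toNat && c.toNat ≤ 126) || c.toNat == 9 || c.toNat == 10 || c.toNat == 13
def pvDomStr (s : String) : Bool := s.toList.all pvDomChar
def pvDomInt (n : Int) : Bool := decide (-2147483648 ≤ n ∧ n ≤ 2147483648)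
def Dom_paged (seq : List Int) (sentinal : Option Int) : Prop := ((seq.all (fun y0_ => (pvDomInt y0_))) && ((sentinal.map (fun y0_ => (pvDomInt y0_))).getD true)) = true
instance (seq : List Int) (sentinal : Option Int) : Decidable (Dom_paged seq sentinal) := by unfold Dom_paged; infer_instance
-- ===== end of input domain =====

-- B builds [sentinal]+seq+[sentinal] once and zips three offset views, replacing A's prev/cur/empty state machine (idiomatic; return value only — both Pythons are generators).
-- ===== PORT A =====
-- the for-loop over seq with state (prev, cur, empty) and the final yield, step for step
def pagedLoop (rest : List Int) (prev cur : Option Int) (empty : Bool) (sentinal : Option Int) :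
    List (Option Int × Option Int × Option Int) :=
  match rest with
  | [] => if empty then [] else [(prev, cur, sentinal)]
  | item :: rest' =>
      (if empty then [] else [(prev, cur, some item)]) ++
        pagedLoop rest' cur (some item) false sentinal

def paged (seq : List Int) (sentinal : Option Int) : List (Option Int × Option Int × Option Int) :=
  pagedLoop seq sentinal sentinal true sentinal

-- ===== PORT B =====
-- padded = [sentinal] + list(seq) + [sentinal]; zip(padded, padded[1:], padded[2:])
-- (padded[1:]/padded[2:] are total tail slices = List.drop 1 / List.drop 2)
def paged_alt (seq : List Int) (sentinal : Option Int) : List (Option Int × Option Int × Option Int) :=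
  let padded : List (Option Int) := sentinal :: (seq.map some ++ [sentinal])
  List.zip padded (List.zip (padded.drop 1) (padded.drop 2))

-- ===== PRECONDITION & SPEC =====
def Spec_paged (seq : List Int) (sentinal : Option Int) (out : List (Option Int × Option Int × Option Int)) : Prop := out = paged_alt seq sentinal
instance (seq : List Int) (sentinal : Option Int) (out : List (Option Int × Option Int × Option Int)) : Decidable (Spec_paged seq sentinal out) := by unfold Spec_paged; infer_instance

-- ===== CLAIM (what is proved, stated in full; the proofs are below) =====
def Claim_equal_paged : Prop := ∀ (seq : List Int) (sentinal : Option Int), Dom_paged seq sentinal → Spec_paged seq sentinal (paged seq sentinal)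

-- ===== LEMMAS AND PROOFS =====

-- the invariant of A's loop once the first element has been consumed
theorem pagedLoop_zip (rest : List Int) (prev cur s : Option Int) :
    pagedLoop rest prev cur false s =
      List.zip (prev :: cur :: (rest.map some ++ [s]))
        (List.zip (cur :: (rest.map some ++ [s])) (rest.map some ++ [s])) := by
  induction rest generalizing prev cur with
  | nil => simp [pagedLoop]
  | cons item rest' ih =>
      simp only [pagedLoop, if_neg Bool.false_ne_true, List.singleton_append]
      rw [ih cur (some item)]
      simp [List.zip]

-- ===== VERDICT (by name: the statement is the Claim_ definition above) =====
theorem paged_spec : Claim_equal_paged := by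
  intro seq sentinal _
  unfold Spec_paged
  cases seq with
  | nil => simp [paged, pagedLoop, paged_alt]
  | cons a r =>
      simp [paged, pagedLoop, paged_alt, pagedLoop_zip, List.zip]
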